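-- pv_equiv track=rewrite | github.com/abhaystoic/Common-Python-Programs | traveler_fund.py | requiredAmountAtStart
-- ===== SOURCE A (Python) =====
-- def requiredAmountAtStart(netSaving):
--     # Write your code here
--     sumTillDay = 0
--     requiredAmount = 0
--     for e in netSaving:
--         if e < 0 and abs(e) > sumTillDay:
--             requiredAmount = abs(sumTillDay + e) + 1
--         sumTillDay = sumTillDay + e
--     return requiredAmount
-- ===== SOURCE B (Python) =====
-- def requiredAmountAtStart(netSaving):
--     total = sum(netSaving)
--     suffix = 0
--     for e in reversed(netSaving):
--         p = total - suffix
--         if e < 0 and p < 0: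
--             return 1 - p
--         suffix += e
--     return 0
-- ===== Notes on version B (the rewrite author's own statement) =====
-- stated objective: alternative
-- what changed: Replaces the forward running-sum accumulator (which keeps overwriting requiredAmount) with a reverse scan over suffix sums that returns 1 - prefix[i] at the first qualifying day seen from the end, with an early exit.
import Mathlib
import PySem

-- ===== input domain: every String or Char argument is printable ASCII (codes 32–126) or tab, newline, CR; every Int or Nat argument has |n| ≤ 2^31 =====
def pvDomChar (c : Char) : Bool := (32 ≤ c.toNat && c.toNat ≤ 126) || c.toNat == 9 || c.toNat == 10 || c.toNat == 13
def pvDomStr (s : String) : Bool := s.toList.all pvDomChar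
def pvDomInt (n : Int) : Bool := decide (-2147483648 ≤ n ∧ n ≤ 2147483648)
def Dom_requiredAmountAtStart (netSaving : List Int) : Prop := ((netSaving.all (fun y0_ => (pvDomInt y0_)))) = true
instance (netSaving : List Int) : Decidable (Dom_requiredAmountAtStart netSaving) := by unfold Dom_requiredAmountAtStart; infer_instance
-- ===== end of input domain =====

-- B replaces A's forward accumulator with a reverse suffix-sum scan and an early exit (alternative decomposition, same cost).

-- ===== PORT A =====
-- forward loop over (sumTillDay, requiredAmount)
def requiredAmountAtStart (netSaving : List Int) : Int :=
  (netSaving.foldl (fun (st : Int × Int) e =>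
      (st.1 + e, if e < 0 ∧ |e| > st.1 then |st.1 + e| + 1 else st.2))
    (0, 0)).2

-- ===== PORT B =====
-- reverse scan: p is the prefix sum at the current element; early return at the first qualifying day from the end
def raasGo (total suffix : Int) : List Int → Int
  | [] => 0
  | e :: rest =>
      let p := total - suffix
      if e < 0 ∧ p < 0 then 1 - p else raasGo total (suffix + e) rest

def requiredAmountAtStart_alt (netSaving : List Int) : Int :=
  raasGo netSaving.sum 0 netSaving.reverse

-- ===== PRECONDITION & SPEC =====
def Spec_requiredAmountAtStart (netSaving : List Int) (out : Int) : Prop := out = requiredAmountAtStart_alt netSaving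
instance (netSaving : List Int) (out : Int) : Decidable (Spec_requiredAmountAtStart netSaving out) := by unfold Spec_requiredAmountAtStart; infer_instance

-- ===== CLAIM (what is proved, stated in full; the proofs are below) =====
def Claim_equal_requiredAmountAtStart : Prop := ∀ (netSaving : List Int), Dom_requiredAmountAtStart netSaving → Spec_requiredAmountAtStart netSaving (requiredAmountAtStart netSaving)

-- ===== LEMMAS AND PROOFS =====

-- raasGo depends only on total - suffix
theorem raasGo_shift (rest : List Int) : ∀ (t s c : Int), raasGo (t + c) (s + c) rest = raasGo t s rest := by
  induction rest with
  | nil => intro t s c; rfl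
  | cons e rest ih =>
      intro t s c
      simp only [raasGo]
      have hp : t + c - (s + c) = t - s := by ring
      rw [hp]
      split_ifs with h
      · rfl
      · have := ih t (s + e) c
        rw [show s + c + e = s + e + c by ring, this]

-- A's loop: first component of the state is init + sum, second is computed prefix-wise
theorem raas_fst (l : List Int) : ∀ (s r : Int),
    (l.foldl (fun (st : Int × Int) e =>
      (st.1 + e, if e < 0 ∧ |e| > st.1 then |st.1 + e| + 1 else st.2)) (s, r)).1 = s + l.sum := by
  induction l with
  | nil => intro s r; simp
  | cons e rest ih => intro s r; simp only [List.foldl_cons, List.sum_cons]; rw [ih]; ring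

theorem raas_eq (l : List Int) : requiredAmountAtStart l = requiredAmountAtStart_alt l := by
  induction l using List.reverseRecOn with
  | nil => rfl
  | append_singleton l e ih =>
      unfold requiredAmountAtStart at ih ⊢
      unfold requiredAmountAtStart_alt at ih ⊢
      rw [List.foldl_append, List.reverse_append]
      simp only [List.foldl_cons, List.foldl_nil, List.reverse_singleton, List.singleton_append,
        List.sum_append, List.sum_cons, List.sum_nil, raasGo]
      rw [raas_fst]
      simp only [zero_add, add_zero, sub_zero]
      by_cases h : e < 0 ∧ |e| > l.sum
      · have hneg : l.sum + e < 0 := by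
          rcases h with ⟨h1, h2⟩
          rw [abs_of_neg h1] at h2
          omega
        rw [if_pos h, if_pos ⟨h.1, hneg⟩, abs_of_neg hneg]
        ring
      · have hcond : ¬ (e < 0 ∧ l.sum + e < 0) := by
          intro ⟨h1, h2⟩
          exact h ⟨h1, by rw [abs_of_neg h1]; omega⟩
        rw [if_neg h, if_neg hcond, ih]
        have := raasGo_shift l.reverse l.sum 0 e
        rw [zero_add] at this
        exact this.symm

-- ===== VERDICT (by name: the statement is the Claim_ definition above) =====
theorem requiredAmountAtStart_spec : Claim_equal_requiredAmountAtStart := by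
  intro l _
  unfold Spec_requiredAmountAtStart
  exact raas_eq l
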